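-- pv_equiv track=rewrite | github.com/Helsinki-NLP/lm-evaluation-harness | lm_eval/tasks/wmt_generalmt_doc/utils.py | _split_docs
-- ===== SOURCE A (Python) =====
-- from typing import Any, Dict, List, Tuple
--
-- def _split_docs(text: str) -> List[List[str]]:
--     docs: List[List[str]] = []
--     current: List[str] = []
--
--     for line in text.splitlines():
--         line = line.strip()
--         if not line:
--             if current:
--                 docs.append(current)
--                 current = []
--             continue
--         current.append(line)
--
--     if current:
--         docs.append(current)
--
--     return docs
-- ===== SOURCE B (Python) =====
-- from typing import Any, Dict, List, Tuple
--
-- def _split_docs(text: str) -> List[List[str]]: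
--     lines = [l.strip() for l in text.splitlines()]
--     bounds = [-1] + [i for i, l in enumerate(lines) if not l] + [len(lines)]
--     return [lines[a + 1:b] for a, b in zip(bounds, bounds[1:]) if b - a > 1]
-- ===== Notes on version B (the rewrite author's own statement) =====
-- stated objective: alternative
-- what changed: Replaces the stateful buffer/flush loop with staged passes: strip all lines, compute the list of blank-line indices as segment boundaries, then slice the line list between consecutive boundaries, keeping the non-empty segments.
import Mathlib
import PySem

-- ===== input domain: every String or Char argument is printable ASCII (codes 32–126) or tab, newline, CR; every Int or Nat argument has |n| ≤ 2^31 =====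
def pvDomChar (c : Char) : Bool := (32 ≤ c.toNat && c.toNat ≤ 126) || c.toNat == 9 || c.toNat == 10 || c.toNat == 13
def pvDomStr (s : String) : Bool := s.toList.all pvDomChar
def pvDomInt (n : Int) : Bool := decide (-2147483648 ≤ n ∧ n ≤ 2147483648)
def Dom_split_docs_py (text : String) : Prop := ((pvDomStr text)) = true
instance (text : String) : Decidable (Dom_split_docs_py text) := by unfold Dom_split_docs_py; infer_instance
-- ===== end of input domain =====

-- B replaces A's stateful buffer/flush loop by staged passes: strip the lines, collect the
-- blank-line indices as boundaries, and slice the line list between consecutive boundaries;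
-- same O(n) cost, a different decomposition (no run accumulator).


-- ===== PORT A =====
-- the loop body: state = (docs, current); flush current on blank stripped line
def pvStepA (s : List (List String) × List String) (rawline : String) :
    List (List String) × List String :=
  let line := PySem.Str.strip rawline
  if line = "" then
    (if s.2 ≠ [] then (s.1 ++ [s.2], ([] : List String)) else s)
  else
    (s.1, s.2 ++ [line])

def split_docs_py (text : String) : List (List String) :=
  let st := (PySem.Str.splitlines text).foldl pvStepA ([], [])
  if st.2 ≠ [] then st.1 ++ [st.2] else st.1

-- ===== PORT B =====
-- lines = [l.strip() for l in text.splitlines()]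
-- bounds = [-1] + [i for i, l in enumerate(lines) if not l] + [len(lines)]
-- return [lines[a+1:b] for a, b in zip(bounds, bounds[1:]) if b - a > 1]
def split_docs_py_alt (text : String) : List (List String) :=
  let lines := (PySem.Str.splitlines text).map PySem.Str.strip
  let bounds : List Int :=
    [-1] ++ (PySem.List.enumerate lines 0).filterMap
      (fun p => if p.2 = "" then some p.1 else none) ++ [(lines.length : Int)]
  (bounds.zip bounds.tail).filterMap
    (fun p => if p.2 - p.1 > 1 then
        some (PySem.List.slice lines (some (p.1 + 1)) (some p.2)) else none)

-- ===== PRECONDITION & SPEC =====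
def Spec_split_docs_py (text : String) (out : List (List String)) : Prop := out = split_docs_py_alt text
instance (text : String) (out : List (List String)) : Decidable (Spec_split_docs_py text out) := by unfold Spec_split_docs_py; infer_instance

-- ===== CLAIM (what is proved, stated in full; the proofs are below) =====
def Claim_equal_split_docs_py : Prop := ∀ (text : String), Dom_split_docs_py text → Spec_split_docs_py text (split_docs_py text)

-- ===== LEMMAS AND PROOFS =====

-- common canonical form: maximal runs of non-blank lines
def pvRuns : List String → List (List String)
  | [] => []
  | x :: xs =>
    if x = "" then pvRuns xs
    else (x :: xs.takeWhile (· ≠ "")) :: pvRuns (xs.dropWhile (· ≠ ""))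
termination_by l => l.length
decreasing_by
  · simp
  · have h := List.length_dropWhile_le (p := (· ≠ "")) (l := xs)
    simp at h ⊢; omega

-- A's computation on already-stripped lines, as a recursive function with pending buffer `cur`
def pvRunsAux (cur : List String) : List String → List (List String)
  | [] => if cur = [] then [] else [cur]
  | x :: xs =>
    if x = "" then (if cur = [] then pvRunsAux [] xs else cur :: pvRunsAux [] xs)
    else pvRunsAux (cur ++ [x]) xs

-- the fold-with-flush over stripped lines equals pvRunsAux
theorem pv_foldA (ls : List String) :
    ∀ (docs : List (List String)) (cur : List String),
    (let st := ls.foldl pvStepA (docs, cur) ;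
     if st.2 ≠ [] then st.1 ++ [st.2] else st.1)
    = docs ++ pvRunsAux cur (ls.map PySem.Str.strip) := by
  induction ls with
  | nil =>
    intro docs cur
    simp only [List.foldl_nil, List.map_nil, pvRunsAux]
    by_cases h : cur = [] <;> simp [h]
  | cons x xs ih =>
    intro docs cur
    rw [List.foldl_cons]
    by_cases hx : PySem.Str.strip x = ""
    · by_cases hc : cur = []
      · rw [show pvStepA (docs, cur) x = (docs, cur) from by simp [pvStepA, hx, hc], ih]
        simp [pvRunsAux, hx, hc]
      · rw [show pvStepA (docs, cur) x = (docs ++ [cur], []) from by simp [pvStepA, hx, hc], ih]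
        simp [pvRunsAux, hx, hc]
    · rw [show pvStepA (docs, cur) x = (docs, cur ++ [PySem.Str.strip x]) from by
          simp [pvStepA, hx], ih]
      simp [pvRunsAux, hx]

theorem pv_auxA (ls : List String) :
    pvRunsAux [] ls = pvRuns ls ∧
    ∀ (cur : List String), cur ≠ [] →
      pvRunsAux cur ls = (cur ++ ls.takeWhile (· ≠ "")) :: pvRuns (ls.dropWhile (· ≠ "")) := by
  induction ls with
  | nil =>
    constructor
    · simp [pvRunsAux, pvRuns]
    · intro cur hc; simp [pvRunsAux, pvRuns, hc]
  | cons x xs ih =>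
    by_cases hx : x = ""
    · constructor
      · rw [show pvRunsAux [] (x :: xs) = pvRunsAux [] xs from by simp [pvRunsAux, hx]]
        rw [ih.1, hx, pvRuns]
        simp
      · intro cur hc
        rw [show pvRunsAux cur (x :: xs) = cur :: pvRunsAux [] xs from by
            simp [pvRunsAux, hx, hc]]
        rw [ih.1, hx]
        simp [pvRuns]
    · constructor
      · rw [show pvRunsAux [] (x :: xs) = pvRunsAux [x] xs from by simp [pvRunsAux, hx]]
        rw [ih.2 [x] (by simp), pvRuns]
        simp [hx]
      · intro cur hc
        rw [show pvRunsAux cur (x :: xs) = pvRunsAux (cur ++ [x]) xs from by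
            simp [pvRunsAux, hx]]
        rw [ih.2 (cur ++ [x]) (by simp)]
        simp [hx]

-- B side: B on a stripped line list, as a function of the line list
def pvBlanks (ls : List String) : List Int :=
  (PySem.List.enumerate ls 0).filterMap (fun p => if p.2 = "" then some p.1 else none)

def pvSeg (ls : List String) (ps : List (Int × Int)) : List (List String) :=
  ps.filterMap (fun p => if p.2 - p.1 > 1 then
      some (PySem.List.slice ls (some (p.1 + 1)) (some p.2)) else none)

def pvAdj (l : List Int) : List (Int × Int) := l.zip l.tail

-- structural characterisations of pvBlanks
theorem pvEnum_shift {a : Type} (xs : List a) (s : Int) :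
    PySem.List.enumerate xs (s + 1) = (PySem.List.enumerate xs s).map (fun p => (p.1 + 1, p.2)) := by
  induction xs generalizing s with
  | nil => simp [PySem.List.enumerate_nil]
  | cons x xs ih =>
    rw [PySem.List.enumerate_cons, PySem.List.enumerate_cons, List.map_cons, ih (s + 1)]

theorem pvBlanks_cons (x : String) (xs : List String) :
    pvBlanks (x :: xs)
      = (if x = "" then [(0 : Int)] else []) ++ (pvBlanks xs).map (fun i => i + 1) := by
  unfold pvBlanks
  rw [PySem.List.enumerate_cons, show (0 : Int) + 1 = 0 + 1 from rfl, pvEnum_shift xs 0,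
    List.filterMap_cons, List.filterMap_map]
  by_cases hx : x = "" <;>
    simp [hx, List.map_filterMap, apply_ite (Option.map (fun i : Int => i + 1))]

theorem pvBlanks_nonneg (ls : List String) : ∀ i ∈ pvBlanks ls, 0 ≤ i := by
  induction ls with
  | nil => intro i hi; simp [pvBlanks, PySem.List.enumerate_nil] at hi
  | cons x xs ih =>
    intro i hi
    rw [pvBlanks_cons] at hi
    rcases List.mem_append.1 hi with h | h
    · split at h <;> simp_all
    · obtain ⟨j, hj, rfl⟩ := List.mem_map.1 h
      have := ih j hj; omega

theorem pvBlanks_head? (xs : List String) :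
    (pvBlanks xs ++ [(xs.length : Int)]).head?
      = some (((xs.takeWhile (· ≠ "")).length : Int)) := by
  induction xs with
  | nil => simp [pvBlanks, PySem.List.enumerate_nil]
  | cons x xs ih =>
    rw [pvBlanks_cons]
    by_cases hx : x = ""
    · simp [hx]
    · have hlen : (((x :: xs).length : Nat) : Int) = ((xs.length : Nat) : Int) + 1 := by
        simp
      rw [if_neg hx, List.nil_append, hlen,
        show ([(((xs.length : Nat) : Int) + 1)] = [((xs.length : Nat) : Int)].map (fun i => i + 1)) from rfl,
        ← List.map_append, List.head?_map, ih]
      simp [hx]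

-- adjacent-pairs lemmas
theorem pvAdj_map (f : Int → Int) (l : List Int) :
    pvAdj (l.map f) = (pvAdj l).map (Prod.map f f) := by
  unfold pvAdj
  rw [← List.map_tail, List.zip_map]

theorem pvAdj_cons₂ (a b : Int) (l : List Int) :
    pvAdj (a :: b :: l) = (a, b) :: pvAdj (b :: l) := rfl

theorem pvAdj_mem_fst (l : List Int) (p : Int × Int) (hp : p ∈ pvAdj l) : p.1 ∈ l := by
  obtain ⟨a, b⟩ := p
  exact (List.of_mem_zip hp).1

-- pvSeg on a cons pair: emit or skip
theorem pvSeg_take (ls : List String) (p : Int × Int) (ps : List (Int × Int))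
    (h : p.2 - p.1 > 1) :
    pvSeg ls (p :: ps)
      = PySem.List.slice ls (some (p.1 + 1)) (some p.2) :: pvSeg ls ps := by
  simp only [pvSeg, List.filterMap_cons, if_pos h]

theorem pvSeg_skip (ls : List String) (p : Int × Int) (ps : List (Int × Int))
    (h : ¬ p.2 - p.1 > 1) :
    pvSeg ls (p :: ps) = pvSeg ls ps := by
  simp only [pvSeg, List.filterMap_cons, if_neg h]

-- slice lemmas (Python slices on a cons cell)
theorem pvSliceShift {a : Type} (y : a) (xs : List a) (i b : Int) (hi : 1 ≤ i) (hb : 1 ≤ b) :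
    PySem.List.slice (y :: xs) (some i) (some b)
      = PySem.List.slice xs (some (i - 1)) (some (b - 1)) := by
  rw [PySem.List.slice_toNat _ (by omega) (by omega),
    PySem.List.slice_toNat _ (by omega) (by omega)]
  rw [show i.toNat = (i - 1).toNat + 1 from by omega, List.drop_succ_cons]
  congr 1
  omega

theorem pvSliceHead {a : Type} (x : a) (xs : List a) (b : Int) (hb : 1 ≤ b) :
    PySem.List.slice (x :: xs) (some 0) (some b)
      = x :: PySem.List.slice xs (some 0) (some (b - 1)) := by
  rw [PySem.List.slice_toNat _ (by omega) (by omega),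
    PySem.List.slice_toNat _ (by omega) (by omega)]
  simp only [Int.toNat_zero, List.drop_zero, Nat.sub_zero]
  rw [show b.toNat = (b - 1).toNat + 1 from by omega, List.take_succ_cons]

-- shifting every boundary pair by one matches prepending a line
theorem pvSeg_shift (y : String) (ls : List String) (ps : List (Int × Int))
    (h : ∀ p ∈ ps, -1 ≤ p.1) :
    pvSeg (y :: ls) (ps.map (Prod.map (fun i => i + 1) (fun i => i + 1))) = pvSeg ls ps := by
  induction ps with
  | nil => rfl
  | cons p ps ih =>
    obtain ⟨u, v⟩ := p
    have hp : -1 ≤ u := h (u, v) (by simp)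
    by_cases hgt : v - u > 1
    · rw [List.map_cons,
        pvSeg_take _ _ _ (by simp [Prod.map]; omega),
        pvSeg_take _ _ _ hgt,
        show (Prod.map (fun i : Int => i + 1) (fun i : Int => i + 1) (u, v)) = (u + 1, v + 1) from rfl,
        pvSliceShift y ls (u + 1 + 1) (v + 1) (by omega) (by omega),
        show u + 1 + 1 - 1 = u + 1 from by omega,
        show v + 1 - 1 = v from by omega,
        ih (fun q hq => h q (by simp [hq]))]
    · rw [List.map_cons,
        pvSeg_skip _ _ _ (by simp [Prod.map]; omega),
        pvSeg_skip _ _ _ hgt]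
      exact ih (fun q hq => h q (by simp [hq]))

theorem pvSlice_takeWhile (xs : List String) :
    PySem.List.slice xs (some 0) (some ((xs.takeWhile (· ≠ "")).length : Int))
      = xs.takeWhile (· ≠ "") := by
  rw [PySem.List.slice_toNat _ (by omega) (by positivity)]
  simp only [List.drop_zero, Int.toNat_natCast, Int.toNat_zero, Nat.sub_zero]
  exact (List.prefix_iff_eq_take.1 (List.takeWhile_prefix _)).symm

theorem pvB_eq_pvRuns (ls : List String) :
    pvSeg ls (pvAdj ((-1) :: pvBlanks ls ++ [(ls.length : Int)])) = pvRuns ls := by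
  induction ls with
  | nil =>
    simp [pvBlanks, PySem.List.enumerate_nil, pvAdj, pvSeg, pvRuns]
  | cons x xs ih =>
    simp only [List.cons_append] at ih ⊢
    have hnn : ∀ i ∈ pvBlanks xs ++ [((xs.length : Nat) : Int)], 0 ≤ i := by
      intro i hi
      rcases List.mem_append.1 hi with h | h
      · exact pvBlanks_nonneg xs i h
      · simp at h; omega
    have hlen : (((x :: xs).length : Nat) : Int) = ((xs.length : Nat) : Int) + 1 := by
      simp
    obtain ⟨t, r, hu⟩ : ∃ t r, pvBlanks xs ++ [((xs.length : Nat) : Int)] = t :: r := by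
      cases h : pvBlanks xs ++ [((xs.length : Nat) : Int)] with
      | nil => simp at h
      | cons t r => exact ⟨t, r, rfl⟩
    have ht : t = ((xs.takeWhile (· ≠ "")).length : Int) := by
      have := pvBlanks_head? xs
      rw [hu] at this
      simpa using this
    have ht0 : 0 ≤ t := hnn t (by rw [hu]; simp)
    have hpairs : ∀ p ∈ pvAdj (t :: r), -1 ≤ p.1 := by
      intro p hp
      have h1 : p.1 ∈ t :: r := pvAdj_mem_fst _ _ hp
      have := hnn p.1 (by rw [hu]; exact h1)
      omega
    have hmapapp : (pvBlanks xs).map (fun i => i + 1) ++ [((xs.length : Nat) : Int) + 1]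
        = (pvBlanks xs ++ [((xs.length : Nat) : Int)]).map (fun i => i + 1) := by
      simp
    by_cases hx : x = ""
    · -- blank first line: the leading pair (-1, 0) is skipped and everything shifts by one
      rw [pvBlanks_cons, if_pos hx, hlen]
      simp only [List.cons_append, List.nil_append]
      rw [pvAdj_cons₂, pvSeg_skip _ _ _ (by norm_num), hmapapp,
        show ((0 : Int) :: (pvBlanks xs ++ [((xs.length : Nat) : Int)]).map (fun i => i + 1))
            = ((-1 : Int) :: (pvBlanks xs ++ [((xs.length : Nat) : Int)])).map (fun i => i + 1) from by
          simp,
        pvAdj_map, pvSeg_shift x xs _ (by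
          intro p hp
          have h1 : p.1 ∈ (-1 : Int) :: (pvBlanks xs ++ [((xs.length : Nat) : Int)]) := pvAdj_mem_fst _ _ hp
          rcases List.mem_cons.1 h1 with h1 | h1
          · omega
          · have := hnn p.1 h1; omega),
        ih]
      exact (by rw [pvRuns, if_pos hx] : pvRuns (x :: xs) = pvRuns xs).symm
    · -- non-blank first line: the leading pair (-1, t + 1) emits x :: takeWhile
      rw [pvBlanks_cons, if_neg hx, hlen]
      simp only [List.nil_append]
      have hsl : PySem.List.slice xs (some 0) (some t) = xs.takeWhile (· ≠ "") := by
        rw [ht]; exact pvSlice_takeWhile xs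
      rw [hmapapp, hu, List.map_cons, pvAdj_cons₂,
        pvSeg_take _ _ _ (by omega),
        show ((t + 1) :: r.map (fun i : Int => i + 1)) = (t :: r).map (fun i : Int => i + 1) from rfl,
        pvAdj_map,
        pvSeg_shift x xs _ hpairs,
        show (-1 : Int) + 1 = 0 from rfl,
        pvSliceHead x xs (t + 1) (by omega),
        show t + 1 - 1 = t from by omega, hsl]
      -- the IH's boundary list for xs starts with the pair (-1, t)
      rw [hu, pvAdj_cons₂] at ih
      by_cases ht' : t > 0
      · -- xs starts with a non-blank line
        have htw : xs.takeWhile (· ≠ "") ≠ [] := by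
          intro hnil
          rw [ht, hnil] at ht'
          simp at ht'
        obtain ⟨y, ys, hxs⟩ : ∃ y ys, xs = y :: ys := by
          cases xs with
          | nil => simp at htw
          | cons y ys => exact ⟨y, ys, rfl⟩
        have hy : (y ≠ "") := by
          intro hy
          rw [hxs, List.takeWhile_cons, hy] at htw
          simp at htw
        have hruns_xs : pvRuns xs = xs.takeWhile (· ≠ "") :: pvRuns (xs.dropWhile (· ≠ "")) := by
          rw [hxs, pvRuns, if_neg hy, List.takeWhile_cons, List.dropWhile_cons]
          simp [hy]
        rw [pvSeg_take _ _ _ (by omega), show (-1 : Int) + 1 = 0 from rfl, hsl,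
          hruns_xs] at ih
        have tail_eq : pvSeg xs (pvAdj (t :: r)) = pvRuns (xs.dropWhile (· ≠ "")) := by
          simp only [List.cons.injEq] at ih
          exact ih.2
        rw [tail_eq]
        exact (by rw [pvRuns, if_neg hx] : pvRuns (x :: xs)
          = (x :: xs.takeWhile (· ≠ "")) :: pvRuns (xs.dropWhile (· ≠ ""))).symm
      · -- t = 0: xs starts blank (or is empty); the emitted doc is just [x]
        have ht0' : t = 0 := by omega
        have htw : xs.takeWhile (· ≠ "") = [] := by
          rw [ht0'] at ht
          exact List.eq_nil_of_length_eq_zero (by omega)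
        have hdw : xs.dropWhile (· ≠ "") = xs := by
          have h2 := List.takeWhile_append_dropWhile (p := (· ≠ "")) (l := xs)
          rw [htw] at h2
          simpa using h2
        rw [pvSeg_skip _ _ _ (by omega)] at ih
        rw [ih, htw]
        exact (by rw [pvRuns, if_neg hx, htw, hdw] : pvRuns (x :: xs)
          = (x :: ([] : List String)) :: pvRuns xs).symm

-- ===== VERDICT (by name: the statement is the Claim_ definition above) =====
theorem split_docs_py_spec : Claim_equal_split_docs_py := by
  intro text _
  unfold Spec_split_docs_py split_docs_py split_docs_py_alt
  rw [pv_foldA, (pv_auxA _).1, List.nil_append, ← pvB_eq_pvRuns]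
  rfl
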